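-- pv_equiv track=rewrite | github.com/alpa-projects/alpa | parax/mesh_profiling.py | enumerate_all_collective_spec
-- ===== SOURCE A (Python) =====
-- def enumerate_all_collective_spec(num_hosts, num_devices_per_host,
--                                   size_configs):
--     # Enumerate all possible logical meshes
--     logical_mesh_shapes = []
--     total_devices = num_hosts * num_devices_per_host
--     for i in range(1, total_devices + 1):
--         if total_devices % i == 0:
--             logical_mesh_shapes.append((total_devices // i, i))
--
--     # Enumerate all replica groups
--     all_specs = set()
--     for logical_mesh_shape in logical_mesh_shapes:
--         # dim 0
--         replica_groups = []
--         tmp_group = []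
--         for i in range(logical_mesh_shape[0]):
--             tmp_group.append(
--                 tuple(i * logical_mesh_shape[1] + j
--                       for j in range(logical_mesh_shape[1])))
--         replica_groups.append(tuple(tmp_group))
--
--         # dim 1
--         tmp_group = []
--         for j in range(logical_mesh_shape[1]):
--             tmp_group.append(
--                 tuple(i * logical_mesh_shape[1] + j
--                       for i in range(logical_mesh_shape[0])))
--         replica_groups.append(tuple(tmp_group))
--
--         for replica_group in replica_groups:
--             for size, dtype in size_configs:
--                 all_specs.add((tuple(replica_group), dtype, size))
--     all_specs = list(all_specs)
--     all_specs.sort()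
--     return list(all_specs)
-- ===== SOURCE B (Python) =====
-- import math
--
--
-- def enumerate_all_collective_spec(num_hosts, num_devices_per_host,
--                                   size_configs):
--     total_devices = num_hosts * num_devices_per_host
--     all_specs = set()
--     if total_devices > 0:
--         for i in range(1, math.isqrt(total_devices) + 1):
--             if total_devices % i != 0:
--                 continue
--             for rows, cols in ((total_devices // i, i),
--                                (i, total_devices // i)):
--                 dim0 = tuple(
--                     tuple(range(k * cols, (k + 1) * cols))
--                     for k in range(rows))
--                 dim1 = tuple(zip(*dim0))
--                 for replica_group in (dim0, dim1):
--                     for size, dtype in size_configs: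
--                         all_specs.add((replica_group, dtype, size))
--     return sorted(all_specs)
-- ===== Notes on version B (the rewrite author's own statement) =====
-- stated objective: alternative
-- what changed: Divisors are enumerated only up to isqrt(total_devices), emitting both paired mesh shapes (t//i,i) and (i,t//i) (the set+sort absorbs order and perfect-square duplicates), and the dim-1 replica groups are obtained by transposing the dim-0 row grid with zip(*dim0) instead of recomputing strided indices; total cost stays dominated by building the specs themselves.
import Mathlib
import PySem

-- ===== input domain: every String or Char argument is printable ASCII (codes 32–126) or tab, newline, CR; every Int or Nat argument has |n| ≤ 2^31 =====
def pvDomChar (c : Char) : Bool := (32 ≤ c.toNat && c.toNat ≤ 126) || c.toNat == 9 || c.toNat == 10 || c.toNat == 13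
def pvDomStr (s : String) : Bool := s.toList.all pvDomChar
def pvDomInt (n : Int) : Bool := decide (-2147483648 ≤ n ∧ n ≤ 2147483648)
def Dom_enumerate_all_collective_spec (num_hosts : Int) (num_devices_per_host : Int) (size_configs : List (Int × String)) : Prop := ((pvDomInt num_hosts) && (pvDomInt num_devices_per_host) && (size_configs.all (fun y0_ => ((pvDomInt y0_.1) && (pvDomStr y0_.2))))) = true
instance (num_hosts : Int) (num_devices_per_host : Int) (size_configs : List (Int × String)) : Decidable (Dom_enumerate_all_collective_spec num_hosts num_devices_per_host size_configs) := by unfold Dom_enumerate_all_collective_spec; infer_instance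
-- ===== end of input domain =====

-- B enumerates divisors only up to isqrt(total_devices), emitting both paired mesh shapes, and builds the
-- dim-1 replica groups by transposing the dim-0 row grid; the final set+sort absorbs order and duplicates.

-- Shared helper: the key both ports sort by, modelling Python's tuple comparison on a spec
-- ((group, ...), dtype, size): lexicographic on the replica-group list, then on the dtype's character
-- codes, then the size.  Exact for the specs these programs build: all replica groups of one call
-- partition the same device range range(total_devices), so no group list is a proper lexicographic
-- prefix of another and the comparison is decided componentwise exactly as in Python.
def pvKey (x : List (List Int) × String × Int) : List (List Int) :=
  x.1 ++ [x.2.1.toList.map (fun c => (c.toNat : Int))] ++ [[x.2.2]]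

-- ===== PORT A =====
def enumerate_all_collective_spec (num_hosts : Int) (num_devices_per_host : Int) (size_configs : List (Int × String)) : List (List (List Int) × String × Int) :=
  let total_devices := num_hosts * num_devices_per_host
  let logical_mesh_shapes :=
    (PySem.List.pyRange 1 (total_devices + 1)).foldl
      (fun acc i => if PySem.Int.mod total_devices i == 0 then
          acc ++ [(PySem.Int.floordiv total_devices i, i)] else acc) []
  let all_specs := logical_mesh_shapes.foldl
    (fun s lms =>
      -- dim 0
      let tmp_group0 := (PySem.List.pyRange 0 lms.1).foldl
        (fun tg i => tg ++ [(PySem.List.pyRange 0 lms.2).map (fun j => i * lms.2 + j)]) []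
      -- dim 1
      let tmp_group1 := (PySem.List.pyRange 0 lms.2).foldl
        (fun tg j => tg ++ [(PySem.List.pyRange 0 lms.1).map (fun i => i * lms.2 + j)]) []
      [tmp_group0, tmp_group1].foldl
        (fun s rg => size_configs.foldl (fun s sc => PySem.Set.add s (rg, sc.2, sc.1)) s) s)
    PySem.Set.empty
  PySem.List.sorted all_specs pvKey

-- ===== PORT B =====
-- zip(*rows) for a list of integer rows (truncates at the shortest row, exactly like Python's zip)
def pvTranspose (rows : List (List Int)) : List (List Int) :=
  if h : rows = [] ∨ rows.any (fun r => r.isEmpty) then []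
  else (rows.map (fun r => r.headD 0)) :: pvTranspose (rows.map (fun r => r.tail))
termination_by (rows.headD []).length
decreasing_by
  rcases rows with _ | ⟨r, rs⟩
  · simp at h
  · rcases r with _ | ⟨a, as⟩
    · exact absurd (Or.inr (by simp)) h
    · simp

def enumerate_all_collective_spec_alt (num_hosts : Int) (num_devices_per_host : Int) (size_configs : List (Int × String)) : List (List (List Int) × String × Int) :=
  let total_devices := num_hosts * num_devices_per_host
  let all_specs :=
    if total_devices > 0 then
      -- math.isqrt(n) = Nat.sqrt for n ≥ 0 (exact; the guard keeps total_devices positive)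
      (PySem.List.pyRange 1 ((Nat.sqrt total_devices.toNat : Int) + 1)).foldl
        (fun s i =>
          if PySem.Int.mod total_devices i == 0 then
            [(PySem.Int.floordiv total_devices i, i),
             (i, PySem.Int.floordiv total_devices i)].foldl
              (fun s rc =>
                let dim0 := (PySem.List.pyRange 0 rc.1).map
                  (fun k => PySem.List.pyRange (k * rc.2) ((k + 1) * rc.2))
                let dim1 := pvTranspose dim0
                [dim0, dim1].foldl
                  (fun s rg => size_configs.foldl (fun s sc => PySem.Set.add s (rg, sc.2, sc.1)) s) s)
              s
          else s)
        PySem.Set.empty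
    else PySem.Set.empty
  PySem.List.sorted all_specs pvKey

-- ===== PRECONDITION & SPEC =====
def Spec_enumerate_all_collective_spec (num_hosts : Int) (num_devices_per_host : Int) (size_configs : List (Int × String)) (out : List (List (List Int) × String × Int)) : Prop := out = enumerate_all_collective_spec_alt num_hosts num_devices_per_host size_configs
instance (num_hosts : Int) (num_devices_per_host : Int) (size_configs : List (Int × String)) (out : List (List (List Int) × String × Int)) : Decidable (Spec_enumerate_all_collective_spec num_hosts num_devices_per_host size_configs out) := by unfold Spec_enumerate_all_collective_spec; infer_instance

-- ===== CLAIM (what is proved, stated in full; the proofs are below) =====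
def Claim_equal_enumerate_all_collective_spec : Prop := ∀ (num_hosts : Int) (num_devices_per_host : Int) (size_configs : List (Int × String)), Dom_enumerate_all_collective_spec num_hosts num_devices_per_host size_configs → Spec_enumerate_all_collective_spec num_hosts num_devices_per_host size_configs (enumerate_all_collective_spec num_hosts num_devices_per_host size_configs)

-- ===== LEMMAS AND PROOFS =====

-- canonical replica groups of a logical mesh shape (r, c), and the specs one shape contributes
def pvDim0 (r c : Int) : List (List Int) :=
  (PySem.List.pyRange 0 r).map (fun i => (PySem.List.pyRange 0 c).map (fun j => i * c + j))
def pvDim1 (r c : Int) : List (List Int) :=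
  (PySem.List.pyRange 0 c).map (fun j => (PySem.List.pyRange 0 r).map (fun i => i * c + j))
def pvShapeSpecs (size_configs : List (Int × String)) (rc : Int × Int) : List (List (List Int) × String × Int) :=
  [pvDim0 rc.1 rc.2, pvDim1 rc.1 rc.2].flatMap
    (fun rg => size_configs.map (fun sc => (rg, sc.2, sc.1)))

-- membership in a fold whose step only adds the elements G y
theorem pv_mem_foldl {β α : Type} [BEq α] [LawfulBEq α] (l : List β)
    (F : PySem.Set α → β → PySem.Set α) (G : β → List α)
    (h : ∀ s, ∀ y ∈ l, ∀ x : α, x ∈ F s y ↔ x ∈ s ∨ x ∈ G y) :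
    ∀ (s0 : PySem.Set α) (x : α), x ∈ l.foldl F s0 ↔ x ∈ s0 ∨ ∃ y ∈ l, x ∈ G y := by
  induction l with
  | nil => simp
  | cons a l ih =>
    intro s0 x
    simp only [List.foldl_cons]
    rw [ih (fun s y hy => h s y (List.mem_cons_of_mem a hy)) (F s0 a) x,
        h s0 a (List.mem_cons_self) x]
    simp only [List.mem_cons]
    constructor
    · rintro (((hs | hg) | ⟨y, hy, hx⟩))
      · exact Or.inl hs
      · exact Or.inr ⟨a, Or.inl rfl, hg⟩
      · exact Or.inr ⟨y, Or.inr hy, hx⟩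
    · rintro (hs | ⟨y, (rfl | hy), hx⟩)
      · exact Or.inl (Or.inl hs)
      · exact Or.inl (Or.inr hx)
      · exact Or.inr ⟨y, hy, hx⟩

theorem pv_nodup_foldl {β α : Type} [BEq α] [LawfulBEq α] (l : List β)
    (F : PySem.Set α → β → PySem.Set α)
    (h : ∀ s, ∀ y ∈ l, List.Nodup s → List.Nodup (F s y)) :
    ∀ (s0 : PySem.Set α), List.Nodup s0 → List.Nodup (l.foldl F s0) := by
  induction l with
  | nil => exact fun _ h => h
  | cons a l ih =>
    intro s0 hs
    exact ih (fun s y hy => h s y (List.mem_cons_of_mem a hy)) (F s0 a)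
      (h s0 a List.mem_cons_self hs)

theorem pv_nodup_add {α : Type} [BEq α] [LawfulBEq α] (s : PySem.Set α) (x : α)
    (h : List.Nodup s) : List.Nodup (PySem.Set.add s x) := by
  unfold PySem.Set.add
  split
  · exact h
  · next hc =>
    rw [List.nodup_append]
    refine ⟨h, by simp, ?_⟩
    intro a ha b hb
    rw [List.mem_singleton] at hb
    subst hb
    rintro rfl
    exact hc (by simpa [PySem.Set.contains] using ha)

theorem pv_mem_foldl_add {β α : Type} [BEq α] [LawfulBEq α] (l : List β) (f : β → α)
    (s0 : PySem.Set α) (x : α) :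
    x ∈ l.foldl (fun s y => PySem.Set.add s (f y)) s0 ↔ x ∈ s0 ∨ ∃ y ∈ l, x = f y := by
  rw [pv_mem_foldl l _ (fun y => [f y]) (fun s y _ x => by rw [PySem.Set.mem_add]; simp)]
  simp

-- a strided row is a shifted range
theorem pv_row_eq (k c : Int) :
    PySem.List.pyRange (k * c) ((k + 1) * c) = (PySem.List.pyRange 0 c).map (fun j => k * c + j) := by
  rw [PySem.List.pyRange_of_pos _ _ Int.one_pos, PySem.List.pyRange_of_pos _ _ Int.one_pos]
  simp only [List.map_map]
  have h1 : (k + 1) * c - k * c + 1 - 1 = c := by ring_nf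
  have h2 : (k * c < (k + 1) * c) ↔ (0 < c) := by constructor <;> intro h <;> nlinarith
  rw [h1]
  by_cases hc : 0 < c
  · simp [hc]
  · simp [h2, hc]

-- transpose of a rectangular grid with at least one row
theorem pv_transpose_grid (g : Int → Int → Int) (ks : List Int) (hks : ks ≠ []) (js : List Int) :
    pvTranspose (ks.map (fun k => js.map (g k))) = js.map (fun j => ks.map (fun k => g k j)) := by
  induction js with
  | nil =>
    unfold pvTranspose
    rcases ks with _ | ⟨k, ks'⟩
    · exact absurd rfl hks
    · simp
  | cons j js ih =>
    unfold pvTranspose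
    have hne : ¬(ks.map (fun k => (j :: js).map (g k)) = [] ∨
        (ks.map (fun k => (j :: js).map (g k))).any (fun r => r.isEmpty)) := by
      simp [hks]
    rw [dif_neg hne]
    simp only [List.map_map, List.map_cons]
    have hheads : (ks.map ((fun r => r.headD 0) ∘ fun k => g k j :: js.map (g k))) =
        ks.map (fun k => g k j) := by simp [Function.comp]
    have htails : (ks.map ((fun r => r.tail) ∘ fun k => g k j :: js.map (g k))) =
        ks.map (fun k => js.map (g k)) := by simp [Function.comp]
    rw [hheads, htails, ih]

theorem pv_key_inj : Function.Injective pvKey := by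
  rintro ⟨r1, d1, s1⟩ ⟨r2, d2, s2⟩ h
  unfold pvKey at h
  have hlen : r1.length = r2.length := by
    have := congrArg List.length h
    simp at this
    omega
  rw [List.append_assoc, List.append_assoc] at h
  obtain ⟨hr, hrest⟩ := List.append_inj h hlen
  simp only [List.cons_append, List.nil_append, List.cons.injEq] at hrest
  obtain ⟨hd, hs⟩ := hrest
  have hd' : d1.toList = d2.toList := by
    apply List.map_injective_iff.mpr ?_ hd
    intro c1 c2 hc
    simp only at hc
    have h1 : c1.toNat = c2.toNat := by exact_mod_cast hc
    exact Char.ext (UInt32.toNat_inj.mp h1)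
  refine Prod.ext hr (Prod.ext (String.toList_inj.mp hd') ?_)
  simpa using hs

-- divisor pairing: the full divisor scan and the scan up to the integer square root
-- produce the same set of shapes (t//i, i) resp. {(t//i, i), (i, t//i)}
theorem pv_divisor_pairing (t : Int) (ht : 0 < t) (P : Int × Int → Prop) :
    (∃ i, 1 ≤ i ∧ i ≤ t ∧ PySem.Int.mod t i = 0 ∧ P (PySem.Int.floordiv t i, i)) ↔
    (∃ i, 1 ≤ i ∧ i ≤ ((Nat.sqrt t.toNat : Nat) : Int) ∧ PySem.Int.mod t i = 0 ∧
      (P (PySem.Int.floordiv t i, i) ∨ P (i, PySem.Int.floordiv t i))) := by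
  constructor
  · rintro ⟨i, h1, h2, hmod, hP⟩
    have hipos : 0 < i := by omega
    obtain ⟨k, hk⟩ := (PySem.Int.mod_eq_zero_iff_dvd t i).mp hmod
    have hkpos : 0 < k := by nlinarith
    have hdiv : PySem.Int.floordiv t i = k := by
      rw [PySem.Int.floordiv_eq_ediv_of_pos hipos, hk, Int.mul_ediv_cancel_left _ (by omega)]
    have hdiv2 : PySem.Int.floordiv t k = i := by
      rw [PySem.Int.floordiv_eq_ediv_of_pos hkpos, hk, mul_comm,
        Int.mul_ediv_cancel_left _ (by omega)]
    have hn : t.toNat = i.toNat * k.toNat := by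
      have : ((i.toNat * k.toNat : Nat) : Int) = t := by
        push_cast [Int.toNat_of_nonneg (le_of_lt hipos), Int.toNat_of_nonneg (le_of_lt hkpos)]
        omega
      omega
    by_cases hsq : i ≤ ((Nat.sqrt t.toNat : Nat) : Int)
    · exact ⟨i, h1, hsq, hmod, Or.inl hP⟩
    · have hsqlt : Nat.sqrt t.toNat < i.toNat := by omega
      have hklesqrt : k.toNat ≤ Nat.sqrt t.toNat := by
        rw [Nat.le_sqrt]
        have hia : t.toNat < i.toNat * i.toNat := Nat.sqrt_lt.mp hsqlt
        have hkle : k.toNat ≤ i.toNat := by nlinarith [hn, hia]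
        calc k.toNat * k.toNat ≤ k.toNat * i.toNat := Nat.mul_le_mul_left _ hkle
          _ = t.toNat := by rw [hn, Nat.mul_comm]
      refine ⟨k, by omega, by omega, ?_, Or.inr ?_⟩
      · rw [PySem.Int.mod_eq_zero_iff_dvd]; exact ⟨i, by linarith [hk, mul_comm i k]⟩
      · rw [hdiv2]; rw [hdiv] at hP; exact hP
  · rintro ⟨i, h1, h2, hmod, hP⟩
    have hipos : 0 < i := by omega
    have hile : i ≤ t := by
      have := Nat.sqrt_le_self t.toNat
      omega
    rcases hP with hP | hP
    · exact ⟨i, h1, hile, hmod, hP⟩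
    · obtain ⟨k, hk⟩ := (PySem.Int.mod_eq_zero_iff_dvd t i).mp hmod
      have hkpos : 0 < k := by nlinarith
      have hdiv : PySem.Int.floordiv t i = k := by
        rw [PySem.Int.floordiv_eq_ediv_of_pos hipos, hk, Int.mul_ediv_cancel_left _ (by omega)]
      have hdiv2 : PySem.Int.floordiv t k = i := by
        rw [PySem.Int.floordiv_eq_ediv_of_pos hkpos, hk, mul_comm,
          Int.mul_ediv_cancel_left _ (by omega)]
      refine ⟨k, by omega, by nlinarith, ?_, ?_⟩
      · rw [PySem.Int.mod_eq_zero_iff_dvd]; exact ⟨i, by linarith [hk, mul_comm i k]⟩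
      · rw [hdiv2, ← hdiv]; exact hP

-- the fold adding all (replica_group, dtype, size) combinations
theorem pv_mem_rg_fold (size_configs : List (Int × String)) (rgs : List (List (List Int)))
    (s : PySem.Set (List (List Int) × String × Int)) (x : List (List Int) × String × Int) :
    x ∈ rgs.foldl (fun s rg => size_configs.foldl (fun s sc => PySem.Set.add s (rg, sc.2, sc.1)) s) s ↔
      x ∈ s ∨ ∃ rg ∈ rgs, ∃ sc ∈ size_configs, x = (rg, sc.2, sc.1) := by
  rw [pv_mem_foldl rgs _ (fun rg => size_configs.map (fun sc => (rg, sc.2, sc.1)))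
    (fun s rg _ x => by rw [pv_mem_foldl_add]; simp [eq_comm])]
  simp [eq_comm]

theorem pv_nodup_rg_fold (size_configs : List (Int × String)) (rgs : List (List (List Int)))
    (s : PySem.Set (List (List Int) × String × Int)) (h : List.Nodup s) :
    List.Nodup (rgs.foldl (fun s rg => size_configs.foldl (fun s sc => PySem.Set.add s (rg, sc.2, sc.1)) s) s) := by
  refine pv_nodup_foldl rgs _ (fun s rg _ hs => ?_) s h
  exact pv_nodup_foldl size_configs _ (fun s sc _ hs => pv_nodup_add _ _ hs) s hs

theorem pv_mem_shapeSpecs (size_configs : List (Int × String)) (rc : Int × Int)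
    (x : List (List Int) × String × Int) :
    x ∈ pvShapeSpecs size_configs rc ↔
      ∃ rg ∈ [pvDim0 rc.1 rc.2, pvDim1 rc.1 rc.2], ∃ sc ∈ size_configs, x = (rg, sc.2, sc.1) := by
  unfold pvShapeSpecs
  simp [eq_comm]

theorem pv_pyRange_nil (a b : Int) (h : b ≤ a) : PySem.List.pyRange a b = [] := by
  rw [PySem.List.pyRange_of_pos _ _ Int.one_pos]
  simp [show ¬(a < b) from by omega]

theorem pv_dim0_eq (r c : Int) :
    (PySem.List.pyRange 0 r).map (fun k => PySem.List.pyRange (k * c) ((k + 1) * c)) = pvDim0 r c := by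
  unfold pvDim0
  exact List.map_congr_left (fun k _ => pv_row_eq k c)

theorem pv_dim1_eq (r c : Int) (hr : 1 ≤ r) :
    pvTranspose (pvDim0 r c) = pvDim1 r c := by
  have hks : PySem.List.pyRange 0 r ≠ [] := by
    rw [PySem.List.pyRange_one_cons (by omega)]
    simp
  unfold pvDim0 pvDim1
  exact pv_transpose_grid (fun k j => k * c + j) _ hks _

-- membership in A's set of specs
theorem pv_A_char (t : Int) (size_configs : List (Int × String)) (x : List (List Int) × String × Int) :
    x ∈ (((PySem.List.pyRange 1 (t + 1)).foldl
        (fun acc i => if PySem.Int.mod t i == 0 then acc ++ [(PySem.Int.floordiv t i, i)] else acc) []).foldl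
      (fun s lms =>
        let tmp_group0 := (PySem.List.pyRange 0 lms.1).foldl
          (fun tg i => tg ++ [(PySem.List.pyRange 0 lms.2).map (fun j => i * lms.2 + j)]) []
        let tmp_group1 := (PySem.List.pyRange 0 lms.2).foldl
          (fun tg j => tg ++ [(PySem.List.pyRange 0 lms.1).map (fun i => i * lms.2 + j)]) []
        [tmp_group0, tmp_group1].foldl
          (fun s rg => size_configs.foldl (fun s sc => PySem.Set.add s (rg, sc.2, sc.1)) s) s)
      PySem.Set.empty) ↔
    ∃ i, 1 ≤ i ∧ i ≤ t ∧ PySem.Int.mod t i = 0 ∧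
      x ∈ pvShapeSpecs size_configs (PySem.Int.floordiv t i, i) := by
  rw [PySem.List.foldl_append_if, List.nil_append]
  rw [pv_mem_foldl _ _ (fun lms => pvShapeSpecs size_configs lms) ?hbody PySem.Set.empty x]
  case hbody =>
    intro s lms _ x
    simp only [PySem.List.foldl_append_singleton_eq_map, List.nil_append]
    rw [pv_mem_rg_fold, pv_mem_shapeSpecs]
    simp only [pvDim0, pvDim1]
  · simp only [PySem.Set.empty, List.not_mem_nil, false_or, List.mem_map, List.mem_filter,
      PySem.List.mem_pyRange_one, beq_iff_eq]
    constructor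
    · rintro ⟨lms, ⟨i, ⟨⟨h1, h2⟩, hmod⟩, rfl⟩, hx⟩
      exact ⟨i, h1, by omega, hmod, hx⟩
    · rintro ⟨i, h1, h2, hmod, hx⟩
      exact ⟨_, ⟨i, ⟨⟨h1, by omega⟩, hmod⟩, rfl⟩, hx⟩

-- membership in B's set of specs
theorem pv_B_char (t : Int) (ht : 0 < t) (size_configs : List (Int × String))
    (x : List (List Int) × String × Int) :
    x ∈ ((PySem.List.pyRange 1 (((Nat.sqrt t.toNat : Nat) : Int) + 1)).foldl
      (fun s i =>
        if PySem.Int.mod t i == 0 then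
          [(PySem.Int.floordiv t i, i), (i, PySem.Int.floordiv t i)].foldl
            (fun s rc =>
              let dim0 := (PySem.List.pyRange 0 rc.1).map
                (fun k => PySem.List.pyRange (k * rc.2) ((k + 1) * rc.2))
              let dim1 := pvTranspose dim0
              [dim0, dim1].foldl
                (fun s rg => size_configs.foldl (fun s sc => PySem.Set.add s (rg, sc.2, sc.1)) s) s)
            s
        else s)
      PySem.Set.empty) ↔
    ∃ i, 1 ≤ i ∧ i ≤ ((Nat.sqrt t.toNat : Nat) : Int) ∧ PySem.Int.mod t i = 0 ∧
      (x ∈ pvShapeSpecs size_configs (PySem.Int.floordiv t i, i) ∨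
       x ∈ pvShapeSpecs size_configs (i, PySem.Int.floordiv t i)) := by
  rw [pv_mem_foldl _ _
    (fun i => if PySem.Int.mod t i == 0 then
        pvShapeSpecs size_configs (PySem.Int.floordiv t i, i) ++
        pvShapeSpecs size_configs (i, PySem.Int.floordiv t i) else []) ?hbody PySem.Set.empty x]
  case hbody =>
    intro s i hi x
    rw [PySem.List.mem_pyRange_one] at hi
    by_cases hmod : (PySem.Int.mod t i == 0) = true
    · simp only [hmod, if_true]
      have hmod' : PySem.Int.mod t i = 0 := by simpa using hmod
      obtain ⟨k, hk⟩ := (PySem.Int.mod_eq_zero_iff_dvd t i).mp hmod'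
      have hipos : (0:Int) < i := by omega
      have hkpos : (0:Int) < k := by nlinarith
      have hfd : PySem.Int.floordiv t i = k := by
        rw [PySem.Int.floordiv_eq_ediv_of_pos hipos, hk, Int.mul_ediv_cancel_left _ (by omega)]
      have hstep : ∀ s', ∀ rc ∈ [(PySem.Int.floordiv t i, i), (i, PySem.Int.floordiv t i)],
          ∀ y : List (List Int) × String × Int,
          (y ∈ (let dim0 := (PySem.List.pyRange 0 rc.1).map
                  (fun k => PySem.List.pyRange (k * rc.2) ((k + 1) * rc.2))
                let dim1 := pvTranspose dim0
                [dim0, dim1].foldl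
                  (fun s rg => size_configs.foldl (fun s sc => PySem.Set.add s (rg, sc.2, sc.1)) s) s')) ↔
            y ∈ s' ∨ y ∈ pvShapeSpecs size_configs rc := by
        intro s' rc hrc y
        have hr1 : 1 ≤ rc.1 := by
          rw [List.mem_cons, List.mem_singleton] at hrc
          rcases hrc with rfl | rfl
          · simpa [hfd] using hkpos
          · simpa using hipos
        simp only [pv_dim0_eq, pv_dim1_eq _ _ hr1]
        rw [pv_mem_rg_fold, pv_mem_shapeSpecs]
      rw [pv_mem_foldl _ _ (fun rc => pvShapeSpecs size_configs rc) hstep s x]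
      simp
    · have hb : (PySem.Int.mod t i == 0) = false := by simpa using hmod
      simp only [hb, Bool.false_eq_true, if_false]
      simp
  · simp only [PySem.Set.empty, List.not_mem_nil, false_or, PySem.List.mem_pyRange_one, beq_iff_eq]
    constructor
    · rintro ⟨i, ⟨h1, h2⟩, hx⟩
      by_cases hmod : PySem.Int.mod t i = 0
      · rw [if_pos (by simpa using hmod), List.mem_append] at hx
        exact ⟨i, h1, by omega, hmod, hx⟩
      · rw [if_neg (by simpa using hmod)] at hx
        simp at hx
    · rintro ⟨i, h1, h2, hmod, hx⟩
      refine ⟨i, ⟨h1, by omega⟩, ?_⟩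
      rw [if_pos (by simpa using hmod), List.mem_append]
      exact hx

theorem pv_A_nodup (size_configs : List (Int × String)) (shapes : List (Int × Int)) :
    List.Nodup (shapes.foldl
      (fun s lms =>
        let tmp_group0 := (PySem.List.pyRange 0 lms.1).foldl
          (fun tg i => tg ++ [(PySem.List.pyRange 0 lms.2).map (fun j => i * lms.2 + j)]) []
        let tmp_group1 := (PySem.List.pyRange 0 lms.2).foldl
          (fun tg j => tg ++ [(PySem.List.pyRange 0 lms.1).map (fun i => i * lms.2 + j)]) []
        [tmp_group0, tmp_group1].foldl
          (fun s rg => size_configs.foldl (fun s sc => PySem.Set.add s (rg, sc.2, sc.1)) s) s)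
      PySem.Set.empty) := by
  refine pv_nodup_foldl _ _ (fun s lms _ hs => ?_) _ List.nodup_nil
  exact pv_nodup_rg_fold _ _ _ hs

theorem pv_B_nodup (t : Int) (size_configs : List (Int × String)) (l : List Int) :
    List.Nodup (l.foldl
      (fun s i =>
        if PySem.Int.mod t i == 0 then
          [(PySem.Int.floordiv t i, i), (i, PySem.Int.floordiv t i)].foldl
            (fun s rc =>
              let dim0 := (PySem.List.pyRange 0 rc.1).map
                (fun k => PySem.List.pyRange (k * rc.2) ((k + 1) * rc.2))
              let dim1 := pvTranspose dim0
              [dim0, dim1].foldl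
                (fun s rg => size_configs.foldl (fun s sc => PySem.Set.add s (rg, sc.2, sc.1)) s) s)
            s
        else s)
      PySem.Set.empty) := by
  refine pv_nodup_foldl _ _ (fun s i _ hs => ?_) _ List.nodup_nil
  by_cases hmod : (PySem.Int.mod t i == 0) = true
  · simp only [hmod, if_true]
    exact pv_nodup_foldl _ _ (fun s rc _ hs => pv_nodup_rg_fold _ _ _ hs) _ hs
  · have hb : (PySem.Int.mod t i == 0) = false := by simpa using hmod
    simp only [hb, Bool.false_eq_true, if_false]
    exact hs

theorem pv_AB (num_hosts num_devices_per_host : Int) (size_configs : List (Int × String)) :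
    enumerate_all_collective_spec num_hosts num_devices_per_host size_configs =
    enumerate_all_collective_spec_alt num_hosts num_devices_per_host size_configs := by
  have hperm :
      (((PySem.List.pyRange 1 (num_hosts * num_devices_per_host + 1)).foldl
          (fun acc i => if PySem.Int.mod (num_hosts * num_devices_per_host) i == 0 then
              acc ++ [(PySem.Int.floordiv (num_hosts * num_devices_per_host) i, i)] else acc) []).foldl
        (fun s lms =>
          let tmp_group0 := (PySem.List.pyRange 0 lms.1).foldl
            (fun tg i => tg ++ [(PySem.List.pyRange 0 lms.2).map (fun j => i * lms.2 + j)]) []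
          let tmp_group1 := (PySem.List.pyRange 0 lms.2).foldl
            (fun tg j => tg ++ [(PySem.List.pyRange 0 lms.1).map (fun i => i * lms.2 + j)]) []
          [tmp_group0, tmp_group1].foldl
            (fun s rg => size_configs.foldl (fun s sc => PySem.Set.add s (rg, sc.2, sc.1)) s) s)
        PySem.Set.empty).Perm
      (if num_hosts * num_devices_per_host > 0 then
        (PySem.List.pyRange 1 ((Nat.sqrt (num_hosts * num_devices_per_host).toNat : Int) + 1)).foldl
          (fun s i =>
            if PySem.Int.mod (num_hosts * num_devices_per_host) i == 0 then
              [(PySem.Int.floordiv (num_hosts * num_devices_per_host) i, i),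
               (i, PySem.Int.floordiv (num_hosts * num_devices_per_host) i)].foldl
                (fun s rc =>
                  let dim0 := (PySem.List.pyRange 0 rc.1).map
                    (fun k => PySem.List.pyRange (k * rc.2) ((k + 1) * rc.2))
                  let dim1 := pvTranspose dim0
                  [dim0, dim1].foldl
                    (fun s rg => size_configs.foldl (fun s sc => PySem.Set.add s (rg, sc.2, sc.1)) s) s)
                s
            else s)
          PySem.Set.empty
      else PySem.Set.empty) := by
    by_cases ht : num_hosts * num_devices_per_host > 0
    · rw [if_pos ht, List.perm_ext_iff_of_nodup (pv_A_nodup _ _) (pv_B_nodup _ _ _)]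
      intro x
      rw [pv_A_char, pv_B_char _ ht]
      exact pv_divisor_pairing _ ht (fun rc => x ∈ pvShapeSpecs size_configs rc)
    · rw [if_neg ht, pv_pyRange_nil 1 (num_hosts * num_devices_per_host + 1) (by omega)]
      simp
  simp only [enumerate_all_collective_spec, enumerate_all_collective_spec_alt]
  have h := PySem.List.sorted_eq_sorted_of_perm _ _ pvKey pv_key_inj hperm
  have hd : (@LinearOrder.toDecidableLT _ (List.instLinearOrder :
        LinearOrder (List (List Int)))) = (fun a b => a.decidableLT b) :=
    Subsingleton.elim _ _
  rw [hd] at h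
  exact h

-- ===== VERDICT (by name: the statement is the Claim_ definition above) =====
theorem enumerate_all_collective_spec_spec : Claim_equal_enumerate_all_collective_spec := by
  intro num_hosts num_devices_per_host size_configs _
  show enumerate_all_collective_spec num_hosts num_devices_per_host size_configs =
    enumerate_all_collective_spec_alt num_hosts num_devices_per_host size_configs
  exact pv_AB num_hosts num_devices_per_host size_configs
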